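-- pv_equiv track=rewrite | github.com/3outeille/pipegoose | tests/nn/pipeline_parallel_2/sync/test_progress_tracker.py | get_gpipe_schedules
-- ===== SOURCE A (Python) =====
-- def get_gpipe_schedules(n_partitions, n_microbatches):
--     n_clock_cycles = n_partitions + n_microbatches - 1
--     schedules = []
--     for clock_idx in range(n_clock_cycles):
--         start_partrition = max(clock_idx + 1 - n_microbatches, 0)
--         end_partition = min(clock_idx + 1, n_partitions)
--
--         tasks = []
--         for partition_idx in range(start_partrition, end_partition):
--             microbatch_idx = clock_idx - partition_idx
--             tasks.append((microbatch_idx, partition_idx))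
--
--         schedules.append(tasks)
--
--     return schedules
-- ===== SOURCE B (Python) =====
-- def get_gpipe_schedules(n_partitions, n_microbatches):
--     # Scatter each task directly into its clock-cycle bucket.
--     schedules = [[] for _ in range(n_partitions + n_microbatches - 1)]
--     if n_microbatches > 0:
--         for partition_idx in range(n_partitions):
--             for microbatch_idx in range(n_microbatches):
--                 schedules[microbatch_idx + partition_idx].append((microbatch_idx, partition_idx))
--     return schedules
-- ===== Notes on version B (the rewrite author's own statement) =====
-- stated objective: simpler
-- what changed: Instead of computing per-clock-cycle partition bounds with max/min, B preallocates one empty bucket per clock cycle and scatters each (microbatch, partition) task into bucket microbatch_idx + partition_idx.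
import Mathlib
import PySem

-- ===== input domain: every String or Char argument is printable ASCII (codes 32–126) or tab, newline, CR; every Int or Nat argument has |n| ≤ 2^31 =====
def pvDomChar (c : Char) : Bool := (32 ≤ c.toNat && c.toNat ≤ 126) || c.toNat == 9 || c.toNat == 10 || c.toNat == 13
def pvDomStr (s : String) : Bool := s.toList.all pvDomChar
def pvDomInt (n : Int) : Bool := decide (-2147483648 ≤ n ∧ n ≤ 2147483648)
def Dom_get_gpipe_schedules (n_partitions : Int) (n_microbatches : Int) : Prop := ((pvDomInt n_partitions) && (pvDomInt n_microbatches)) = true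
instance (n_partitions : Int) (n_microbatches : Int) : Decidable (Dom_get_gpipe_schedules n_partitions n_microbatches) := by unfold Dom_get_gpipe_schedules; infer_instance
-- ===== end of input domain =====

-- B builds the same GPipe schedule by scattering each task into its clock-cycle bucket
-- instead of computing per-clock partition bounds with max/min (objective: simpler).

-- ===== PORT A =====
def get_gpipe_schedules (n_partitions : Int) (n_microbatches : Int) : List (List (Int × Int)) :=
  let n_clock_cycles := n_partitions + n_microbatches - 1
  (PySem.List.pyRange 0 n_clock_cycles 1).foldl (fun schedules clock_idx =>
    let start_partrition := max (clock_idx + 1 - n_microbatches) 0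
    let end_partition := min (clock_idx + 1) n_partitions
    let tasks := (PySem.List.pyRange start_partrition end_partition 1).foldl
      (fun tasks partition_idx => tasks ++ [(clock_idx - partition_idx, partition_idx)]) []
    schedules ++ [tasks]) []

-- ===== PORT B =====
-- schedules[k].append(x): k = microbatch_idx + partition_idx is always nonnegative and
-- in range when the loops run, so `.toNat` indexing with `set`/`getD` is exact here.
def get_gpipe_schedules_alt (n_partitions : Int) (n_microbatches : Int) : List (List (Int × Int)) :=
  let schedules := (PySem.List.pyRange 0 (n_partitions + n_microbatches - 1) 1).map
    (fun _ => ([] : List (Int × Int)))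
  if 0 < n_microbatches then
    (PySem.List.pyRange 0 n_partitions 1).foldl (fun s partition_idx =>
      (PySem.List.pyRange 0 n_microbatches 1).foldl (fun s microbatch_idx =>
        s.set (microbatch_idx + partition_idx).toNat
          (s.getD (microbatch_idx + partition_idx).toNat [] ++ [(microbatch_idx, partition_idx)])) s)
      schedules
  else schedules

-- ===== PRECONDITION & SPEC =====
def Spec_get_gpipe_schedules (n_partitions : Int) (n_microbatches : Int) (out : List (List (Int × Int))) : Prop := out = get_gpipe_schedules_alt n_partitions n_microbatches
instance (n_partitions : Int) (n_microbatches : Int) (out : List (List (Int × Int))) : Decidable (Spec_get_gpipe_schedules n_partitions n_microbatches out) := by unfold Spec_get_gpipe_schedules; infer_instance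

-- ===== CLAIM (what is proved, stated in full; the proofs are below) =====
def Claim_equal_get_gpipe_schedules : Prop := ∀ (n_partitions : Int) (n_microbatches : Int), Dom_get_gpipe_schedules n_partitions n_microbatches → Spec_get_gpipe_schedules n_partitions n_microbatches (get_gpipe_schedules n_partitions n_microbatches)

-- ===== LEMMAS AND PROOFS =====

-- the single scatter step of B
def pvStep (s : List (List (Int × Int))) (t : Int × Int) : List (List (Int × Int)) :=
  s.set (t.1 + t.2).toNat (s.getD (t.1 + t.2).toNat [] ++ [t])

-- folding append-of-singleton is map
theorem pv_foldl_append_map {α β : Type} (l : List α) (f : α → β) (acc : List β) :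
    l.foldl (fun acc x => acc ++ [f x]) acc = acc ++ l.map f := by
  induction l generalizing acc with
  | nil => simp
  | cons x xs ih => simp [List.foldl, ih]

theorem pvStep_length (ts : List (Int × Int)) (s : List (List (Int × Int))) :
    (ts.foldl pvStep s).length = s.length := by
  induction ts generalizing s with
  | nil => rfl
  | cons t ts ih => simp [List.foldl, ih, pvStep]

theorem pvScatter_getD (ts : List (Int × Int)) (s : List (List (Int × Int)))
    (h : ∀ t ∈ ts, 0 ≤ t.1 + t.2 ∧ t.1 + t.2 < (s.length : Int)) (c : Nat) (hc : c < s.length) :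
    (ts.foldl pvStep s).getD c [] =
      s.getD c [] ++ ts.filter (fun t => t.1 + t.2 = (c : Int)) := by
  induction ts generalizing s with
  | nil => simp
  | cons t ts ih =>
    obtain ⟨h0, h1⟩ := h t (List.mem_cons_self)
    have hlen : (pvStep s t).length = s.length := by simp [pvStep]
    have hrec := ih (pvStep s t)
      (by intro u hu; rw [hlen]; exact h u (List.mem_cons_of_mem _ hu)) (by rw [hlen]; exact hc)
    rw [List.foldl_cons, hrec]
    by_cases hct : t.1 + t.2 = (c : Int)
    · have hk : (t.1 + t.2).toNat = c := by omega
      have : (pvStep s t).getD c [] = s.getD c [] ++ [t] := by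
        simp [pvStep, hk, List.getD, (by omega : c < s.length)]
      rw [this]
      simp [hct]
    · have hk : (t.1 + t.2).toNat ≠ c := by omega
      have : (pvStep s t).getD c [] = s.getD c [] := by
        simp [pvStep, List.getD, List.getElem?_set_ne hk]
      rw [this]
      simp [hct]

-- nested loops of B = fold over the flattened task list
theorem pv_nested_eq_flat (P M : Int) (s0 : List (List (Int × Int))) :
    (PySem.List.pyRange 0 P 1).foldl (fun s p =>
        (PySem.List.pyRange 0 M 1).foldl (fun s m => pvStep s (m, p)) s) s0
      = ((PySem.List.pyRange 0 P 1).flatMap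
          (fun p => (PySem.List.pyRange 0 M 1).map (fun m => (m, p)))).foldl pvStep s0 := by
  induction PySem.List.pyRange 0 P 1 generalizing s0 with
  | nil => rfl
  | cons p ps ih => simp [List.foldl, ih, List.foldl_map]

-- filtering a step-1 range for a single value
theorem pv_filter_range_single (x : Int) : ∀ (n : Nat) (a b : Int), (b - a).toNat = n →
    (PySem.List.pyRange a b 1).filter (fun m => decide (m = x))
      = if a ≤ x ∧ x < b then [x] else [] := by
  intro n
  induction n with
  | zero =>
    intro a b hn
    rw [PySem.List.pyRange_one_eq_nil (by omega)]
    simp; omega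
  | succ k ih =>
    intro a b hn
    rw [PySem.List.pyRange_one_cons (by omega)]
    rw [List.filter_cons]
    rw [ih (a + 1) b (by omega)]
    by_cases hax : a = x
    · subst hax
      simp [(by omega : a ≤ a ∧ a < b)]
    · simp only [decide_eq_true_eq, hax, if_false]
      split_ifs with h1 h2 <;> first | rfl | omega

-- flatMap of an interval-guarded singleton over a step-1 range is a map over the clipped range
theorem pv_flatMap_if {α : Type} (f : Int → α) (lo hi : Int) : ∀ (n : Nat) (a b : Int), (b - a).toNat = n →
    (PySem.List.pyRange a b 1).flatMap (fun p => if lo ≤ p ∧ p < hi then [f p] else [])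
      = (PySem.List.pyRange (max lo a) (min hi b) 1).map f := by
  intro n
  induction n with
  | zero =>
    intro a b hn
    rw [PySem.List.pyRange_one_eq_nil (by omega), PySem.List.pyRange_one_eq_nil (by omega)]
    rfl
  | succ k ih =>
    intro a b hn
    rw [PySem.List.pyRange_one_cons (by omega)]
    rw [List.flatMap_cons, ih (a + 1) b (by omega)]
    by_cases hc : lo ≤ a ∧ a < hi
    · rw [if_pos hc]
      have h1 : max lo a = a := by omega
      have h2 : max lo (a + 1) = a + 1 := by omega
      rw [h1, h2, PySem.List.pyRange_one_cons (a := a) (b := min hi b) (by omega)]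
      simp
    · rw [if_neg hc]
      by_cases hlo : a < lo
      · have : max lo a = max lo (a + 1) := by omega
        rw [this]; rfl
      · have hhi : hi ≤ a := by omega
        rw [PySem.List.pyRange_one_eq_nil (by omega), PySem.List.pyRange_one_eq_nil (by omega)]
        rfl

-- the bucket for clock cycle c collected by B equals A's task list for c
theorem pv_bucket (P M c : Int) :
    ((PySem.List.pyRange 0 P 1).flatMap
        (fun p => (PySem.List.pyRange 0 M 1).map (fun m => (m, p)))).filter
            (fun t => t.1 + t.2 = c)
      = (PySem.List.pyRange (max (c + 1 - M) 0) (min (c + 1) P) 1).map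
          (fun p => (c - p, p)) := by
  rw [List.filter_flatMap]
  have hinner : ∀ p : Int,
      ((PySem.List.pyRange 0 M 1).map (fun m => ((m : Int), p))).filter
          (fun t => decide (t.1 + t.2 = c))
        = if c + 1 - M ≤ p ∧ p < c + 1 then [((c - p : Int), p)] else [] := by
    intro p
    rw [List.filter_map]
    have : ((PySem.List.pyRange 0 M 1).filter ((fun t => decide (t.1 + t.2 = c)) ∘ (fun m => ((m : Int), p))))
        = (PySem.List.pyRange 0 M 1).filter (fun m => decide (m = c - p)) := by
      apply List.filter_congr
      intro m _
      simp only [Function.comp]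
      simp only [decide_eq_decide]
      omega
    rw [this, pv_filter_range_single (c - p) (M - 0).toNat 0 M rfl]
    by_cases h : 0 ≤ c - p ∧ c - p < M
    · rw [if_pos h, if_pos (by omega)]; rfl
    · rw [if_neg h, if_neg (by omega)]; rfl
  calc (PySem.List.pyRange 0 P 1).flatMap
          (fun p => ((PySem.List.pyRange 0 M 1).map (fun m => ((m : Int), p))).filter
            (fun t => decide (t.1 + t.2 = c)))
      = (PySem.List.pyRange 0 P 1).flatMap
          (fun p => if c + 1 - M ≤ p ∧ p < c + 1 then [((c - p : Int), p)] else []) := by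
        apply List.flatMap_congr; intro p _; exact hinner p
    _ = (PySem.List.pyRange (max (c + 1 - M) 0) (min (c + 1) P) 1).map (fun p => (c - p, p)) := by
        exact pv_flatMap_if (fun p => (c - p, p)) (c + 1 - M) (c + 1) (P - 0).toNat 0 P rfl

-- ===== VERDICT (by name: the statement is the Claim_ definition above) =====
theorem get_gpipe_schedules_spec : Claim_equal_get_gpipe_schedules := by
  intro P M _
  unfold Spec_get_gpipe_schedules get_gpipe_schedules get_gpipe_schedules_alt
  set L : Int := P + M - 1 with hL
  -- A as a map
  have hA : (PySem.List.pyRange 0 L 1).foldl (fun schedules clock_idx =>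
      schedules ++ [(PySem.List.pyRange (max (clock_idx + 1 - M) 0)
          (min (clock_idx + 1) P) 1).foldl
        (fun tasks partition_idx => tasks ++ [(clock_idx - partition_idx, partition_idx)]) []]) []
      = (PySem.List.pyRange 0 L 1).map (fun c =>
        (PySem.List.pyRange (max (c + 1 - M) 0) (min (c + 1) P) 1).map
          (fun p => (c - p, p))) := by
    rw [pv_foldl_append_map (PySem.List.pyRange 0 L 1)
      (fun c => (PySem.List.pyRange (max (c + 1 - M) 0) (min (c + 1) P) 1).foldl
        (fun tasks p => tasks ++ [(c - p, p)]) [])]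
    simp only [List.nil_append]
    apply List.map_congr_left
    intro c _
    exact pv_foldl_append_map _ _ []
  rw [hA]
  set pairs : List (Int × Int) := (PySem.List.pyRange 0 P 1).flatMap
    (fun p => (PySem.List.pyRange 0 M 1).map (fun m => (m, p))) with hpairs
  set s0 : List (List (Int × Int)) := (PySem.List.pyRange 0 L 1).map
    (fun _ => ([] : List (Int × Int))) with hs0
  have hB : (if 0 < M then
      (PySem.List.pyRange 0 P 1).foldl (fun s partition_idx =>
        (PySem.List.pyRange 0 M 1).foldl (fun s microbatch_idx =>
          s.set (microbatch_idx + partition_idx).toNat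
            (s.getD (microbatch_idx + partition_idx).toNat [] ++ [(microbatch_idx, partition_idx)])) s) s0
      else s0)
      = pairs.foldl pvStep s0 := by
    by_cases hM : 0 < M
    · rw [if_pos hM]; exact pv_nested_eq_flat P M s0
    · rw [if_neg hM, hpairs]
      simp only [PySem.List.pyRange_one_eq_nil (show M ≤ 0 by omega), List.map_nil]
      rw [List.flatMap_eq_nil_iff.mpr (fun x _ => rfl), List.foldl_nil]
  rw [hB]
  have hs0len : s0.length = (L - 0).toNat := by
    simp [hs0, PySem.List.length_pyRange_one]
  have hbound : ∀ t ∈ pairs, 0 ≤ t.1 + t.2 ∧ t.1 + t.2 < (s0.length : Int) := by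
    intro t ht
    rw [hpairs] at ht
    simp only [List.mem_flatMap, List.mem_map] at ht
    obtain ⟨p, hp, m, hm, rfl⟩ := ht
    rw [PySem.List.mem_pyRange_one] at hp hm
    rw [hs0len]
    constructor
    · omega
    · have : (((L - 0).toNat : Int)) = L := by omega
      rw [this]; omega
  apply List.ext_getElem
  · rw [pvStep_length, hs0len, List.length_map, PySem.List.length_pyRange_one]
  · intro k hk1 hk2
    have hklen : k < s0.length := by rw [← pvStep_length pairs s0]; exact hk2
    have hgd := pvScatter_getD pairs s0 hbound k hklen
    have hA1 : ((PySem.List.pyRange 0 L 1).map (fun c =>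
        (PySem.List.pyRange (max (c + 1 - M) 0) (min (c + 1) P) 1).map
          (fun p => (c - p, p))))[k]
        = (PySem.List.pyRange (max ((k : Int) + 1 - M) 0) (min ((k : Int) + 1) P) 1).map
          (fun p => ((k : Int) - p, p)) := by
      rw [List.getElem_map]
      rw [PySem.List.getElem_pyRange_one]
      norm_num
    rw [hA1]
    have hB1 : (pairs.foldl pvStep s0)[k] = (pairs.foldl pvStep s0).getD k [] := by
      rw [List.getD_eq_getElem _ _ hk2]
    rw [hB1, hgd]
    have hs0k : s0.getD k [] = [] := by
      rw [List.getD_eq_getElem _ _ hklen]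
      simp [hs0]
    rw [hs0k, List.nil_append]
    exact (pv_bucket P M (k : Int)).symm
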